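-- pv_equiv track=rewrite | github.com/Kenny2github/ECEBot | ECEBot/cmd/self_role.py | indexes_of
-- ===== SOURCE A (Python) =====
-- def indexes_of(search: str, value: str) -> list[int]:
--     """Check whether ``search`` matches ``value``.
--     Return the indexes at which it matched, or an empty list if any didn't.
--
--     Examples:
--         >>> indexes_of('sdmsg', 'send_message')
--         [0, 3, 5, 7, 10]
--         >>> indexes_of('sen', 'send_message')
--         [0, 1, 2]
--         >>> indexes_of('odmsg', 'send_message') # no "o"
--         []
--         >>> indexes_of('sgm', 'send_message') # out of order
--         []
--     """
--     if search == '':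
--         return []
--     indexes = [value.find(search[0])]
--     if indexes[-1] == -1:
--         # character not found
--         return []
--     for c in search[1:]:
--         new_index = value.find(c, indexes[-1])
--         if new_index == -1:
--             # character not found
--             return []
--         indexes.append(new_index)
--     return indexes
-- ===== SOURCE B (Python) =====
-- def indexes_of(search: str, value: str) -> list[int]:
--     """Index-structure approach: one pass over value builds per-character
--     sorted occurrence lists; each search character is then answered by a
--     binary search for the first occurrence >= the previous match.
--     (Fewer character comparisons than A's repeated find scans, but find runs
--     at C speed, so this is an alternative, not a measured speed-up.)"""
--     positions = {}
--     for i, ch in enumerate(value):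
--         positions.setdefault(ch, []).append(i)
--     out = []
--     cursor = 0
--     for c in search:
--         lst = positions.get(c, [])
--         # bisect_left(lst, cursor), hand-written (no imports available)
--         lo, hi = 0, len(lst)
--         while lo < hi:
--             mid = (lo + hi) // 2
--             if lst[mid] < cursor:
--                 lo = mid + 1
--             else:
--                 hi = mid
--         if lo == len(lst):
--             return []
--         cursor = lst[lo]
--         out.append(cursor)
--     return out
-- ===== Notes on version B (the rewrite author's own statement) =====
-- stated objective: alternative
-- what changed: Replaces A's repeated value.find(c, indexes[-1]) scans by an index structure: one pass over value builds per-character sorted occurrence lists (dict of lists), then each search character is resolved by binary search for the first occurrence >= the previous match.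
import Mathlib
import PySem

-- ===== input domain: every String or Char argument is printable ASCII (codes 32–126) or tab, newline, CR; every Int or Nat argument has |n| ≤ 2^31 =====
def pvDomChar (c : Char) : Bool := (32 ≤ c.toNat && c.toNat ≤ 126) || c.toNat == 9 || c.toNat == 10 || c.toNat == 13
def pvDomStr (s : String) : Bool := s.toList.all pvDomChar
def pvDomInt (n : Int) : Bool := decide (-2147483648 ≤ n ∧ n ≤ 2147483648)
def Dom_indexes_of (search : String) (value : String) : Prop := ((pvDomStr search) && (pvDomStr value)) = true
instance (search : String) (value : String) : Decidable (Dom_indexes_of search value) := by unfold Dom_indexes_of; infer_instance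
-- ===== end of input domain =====

-- B replaces A's repeated value.find(c, indexes[-1]) scans by a precomputed per-character
-- sorted occurrence-list index queried by binary search (objective: alternative algorithm).

-- ===== PORT A =====
-- loop 'for c in search[1:]', carrying the growing indexes list; find starts at indexes[-1]
def indexesOfLoopA (value : List Char) (cs : List Char) (indexes : List Int) : List Int :=
  match cs with
  | [] => indexes
  | c :: cs' =>
    let new_index := PySem.Chars.findFrom value [c] (PySem.List.pyGetD indexes (-1) 0)
    if new_index = -1 then []
    else indexesOfLoopA value cs' (indexes ++ [new_index])

def indexes_of (search : String) (value : String) : List Int :=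
  match search.toList with
  | [] => []                                   -- if search == '': return []
  | c :: rest =>
    let i0 := PySem.Chars.find value.toList [c]    -- indexes = [value.find(search[0])]
    if PySem.List.pyGetD [i0] (-1) 0 = -1 then []  -- if indexes[-1] == -1
    else indexesOfLoopA value.toList rest [i0]

-- ===== PORT B =====
-- 'for i, ch in enumerate(value): positions.setdefault(ch, []).append(i)'
-- (setdefault-then-append = modify ch [] (· ++ [i]): default [] if absent, append in place)
def buildPositions (value : List Char) : PySem.Dict Char (List Int) :=
  (PySem.List.enumerate value 0).foldl
    (fun d p => d.modify p.2 [] (· ++ [p.1])) (PySem.Dict.empty)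

-- the hand-written bisect_left while loop: 'while lo < hi: …' (lo, hi ≥ 0 and
-- mid always in range, so Nat division and getD are exact for '//' and lst[mid])
def bisectLoop (lst : List Int) (x : Int) (lo hi : Nat) : Nat :=
  if _h : lo < hi then
    let mid := (lo + hi) / 2
    if lst.getD mid 0 < x then bisectLoop lst x (mid + 1) hi
    else bisectLoop lst x lo mid
  else lo
termination_by hi - lo
decreasing_by all_goals omega

-- 'for c in search', carrying the cursor and the output list
def indexesOfLoopB (positions : PySem.Dict Char (List Int)) (cs : List Char)
    (cursor : Int) (out : List Int) : List Int :=
  match cs with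
  | [] => out
  | c :: cs' =>
    let lst := positions.getD c []
    let lo := bisectLoop lst cursor 0 lst.length
    if lo = lst.length then []
    else
      let cur := lst.getD lo 0
      indexesOfLoopB positions cs' cur (out ++ [cur])

def indexes_of_alt (search : String) (value : String) : List Int :=
  indexesOfLoopB (buildPositions value.toList) search.toList 0 []

-- ===== PRECONDITION & SPEC =====
def Spec_indexes_of (search : String) (value : String) (out : List Int) : Prop := out = indexes_of_alt search value
instance (search : String) (value : String) (out : List Int) : Decidable (Spec_indexes_of search value out) := by unfold Spec_indexes_of; infer_instance

-- ===== CLAIM (what is proved, stated in full; the proofs are below) =====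
def Claim_equal_indexes_of : Prop := ∀ (search : String) (value : String), Dom_indexes_of search value → Spec_indexes_of search value (indexes_of search value)

-- ===== LEMMAS AND PROOFS =====

-- proof-side helper: the first index ≥ i at which c occurs in value (length if none);
-- used only to characterise both A's findFrom and B's binary search on the occurrence list
def bScan (value : List Char) (c : Char) (i : Nat) : Nat :=
  if h : i < value.length then
    if value[i] = c then i else bScan value c (i + 1)
  else i
termination_by value.length - i

theorem bScan_le (value : List Char) (c : Char) (i : Nat) (h : i ≤ value.length) :
    bScan value c i ≤ value.length := by
  unfold bScan
  split
  · split
    · omega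
    · exact bScan_le value c (i + 1) (by omega)
  · omega
termination_by value.length - i

theorem bScan_eq_length (value : List Char) (c : Char) (i : Nat) (h : i ≤ value.length)
    (hni : c ∉ value.drop i) : bScan value c i = value.length := by
  unfold bScan
  split
  · rename_i hlt
    have hmem : value[i] ∈ value.drop i := by
      rw [List.drop_eq_getElem_cons hlt]; exact List.mem_cons_self
    have hne : value[i] ≠ c := fun hc => hni (hc ▸ hmem)
    rw [if_neg hne]
    apply bScan_eq_length value c (i + 1) (by omega)
    intro hm
    exact hni (List.mem_of_mem_drop (by simpa using hm))
  · omega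
termination_by value.length - i

theorem bScan_eq_of_first (value : List Char) (c : Char) (i m : Nat) (him : i ≤ m)
    (hm : m < value.length) (hc : value[m] = c)
    (hfirst : ∀ k, ∀ _ : i ≤ k, ∀ _ : k < m, value[k]'(by omega) ≠ c) :
    bScan value c i = m := by
  unfold bScan
  rw [dif_pos (by omega)]
  by_cases hi : i = m
  · subst hi; rw [if_pos hc]
  · rw [if_neg (hfirst i le_rfl (by omega))]
    exact bScan_eq_of_first value c (i + 1) m (by omega) hm hc
      (fun k hk1 hk2 => hfirst k (by omega) hk2)
termination_by value.length - i

-- bridge: A's value.find(c, i) is exactly the bScan characterisation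
theorem bScan_findFrom (value : List Char) (c : Char) (i : Nat) (h : i ≤ value.length) :
    PySem.Chars.findFrom value [c] (i : Int) =
      if bScan value c i = value.length then -1 else (bScan value c i : Int) := by
  rw [PySem.Chars.findFrom_natCast value [c] i h]
  by_cases hf : PySem.Chars.find (value.drop i) [c] = -1
  · rw [if_pos hf]
    have hmem : c ∉ value.drop i := fun hc =>
      (PySem.Chars.find_eq_neg_one_iff (value.drop i) [c]).mp hf
        ((List.singleton_infix_iff c (value.drop i)).mpr hc)
    rw [if_pos (bScan_eq_length value c i h hmem)]
  · rw [if_neg hf]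
    have h0 : 0 ≤ PySem.Chars.find (value.drop i) [c] := by
      have := PySem.Chars.neg_one_le_find (value.drop i) [c]
      omega
    obtain ⟨hpre, hmin⟩ := PySem.Chars.find_spec h0
    set j := (PySem.Chars.find (value.drop i) [c]).toNat with hj
    have hjlen : i + j < value.length := by
      by_contra h'
      have hnil : (value.drop i).drop j = [] := by
        apply List.drop_eq_nil_of_le
        simp only [List.length_drop]
        omega
      rw [hnil] at hpre
      simp at hpre
    have hdropj : (value.drop i).drop j = value.drop (i + j) := by
      rw [List.drop_drop]
    have hc : value[i + j] = c := by
      rw [hdropj, List.drop_eq_getElem_cons hjlen] at hpre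
      exact ((List.cons_prefix_cons.mp hpre).1).symm
    have hfirst : ∀ k, ∀ _ : i ≤ k, ∀ _ : k < i + j, value[k]'(by omega) ≠ c := by
      intro k hk1 hk2 hkc
      apply hmin (k - i) (by omega)
      have hdk : (value.drop i).drop (k - i) = value.drop k := by
        rw [List.drop_drop]; congr 1; omega
      rw [hdk, List.drop_eq_getElem_cons (by omega : k < value.length), hkc]
      simp
    rw [bScan_eq_of_first value c i (i + j) (by omega) hjlen hc hfirst, if_neg (by omega)]
    have hfj : PySem.Chars.find (value.drop i) [c] = (j : Int) := by omega
    rw [hfj]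
    push_cast
    ring

-- the occurrence list B's dict stores for c: indices of c in value, in order
def occList (value : List Char) (c : Char) : List Int :=
  ((PySem.List.enumerate value 0).filter (fun p => p.2 == c)).map (fun p => p.1)

theorem foldl_swap (l : List (Int × Char)) (d : PySem.Dict Char (List Int)) :
    l.foldl (fun d p => d.modify p.2 [] (· ++ [p.1])) d
      = (l.map (fun p => (p.2, p.1))).foldl (fun d p => d.modify p.1 [] (· ++ [p.2])) d := by
  induction l generalizing d with
  | nil => rfl
  | cons p l ih => simp [List.foldl_cons, ih]

theorem getD_buildPositions (value : List Char) (c : Char) :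
    (buildPositions value).getD c [] = occList value c := by
  unfold buildPositions occList
  rw [foldl_swap, PySem.Dict.getD_foldl_modify_append]
  simp [List.filter_map, List.map_map, Function.comp_def]

theorem mem_occList (value : List Char) (c : Char) (x : Int) :
    x ∈ occList value c ↔ ∃ k, ∃ _ : k < value.length, x = (k : Int) ∧ value[k] = c := by
  unfold occList
  simp only [List.mem_map, List.mem_filter, PySem.List.mem_enumerate_iff]
  constructor
  · rintro ⟨p, ⟨⟨k, hk, rfl⟩, hc⟩, rfl⟩
    refine ⟨k, hk, by simp, ?_⟩
    simpa using hc
  · rintro ⟨k, hk, rfl, hc⟩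
    exact ⟨((k : Int), value[k]), ⟨⟨k, hk, by simp⟩, by simpa using hc⟩, rfl⟩

theorem pairwise_occList (value : List Char) (c : Char) :
    (occList value c).Pairwise (· < ·) := by
  unfold occList
  exact List.pairwise_map.mpr ((PySem.List.pairwise_lt_enumerate value 0).filter _)

theorem bisectLoop_spec (lst : List Int) (x : Int) (lo hi : Nat)
    (hhi : hi ≤ lst.length) (hlo : lo ≤ hi) (hp : lst.Pairwise (· < ·)) :
    lo ≤ bisectLoop lst x lo hi ∧ bisectLoop lst x lo hi ≤ hi ∧
    (∀ k, lo ≤ k → k < bisectLoop lst x lo hi → lst.getD k 0 < x) ∧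
    (bisectLoop lst x lo hi < hi → x ≤ lst.getD (bisectLoop lst x lo hi) 0) := by
  have hmono : ∀ i j : Nat, i ≤ j → j < lst.length → lst.getD i 0 ≤ lst.getD j 0 := by
    intro i j hij hj
    rcases Nat.eq_or_lt_of_le hij with rfl | hlt
    · exact le_refl _
    · rw [List.getD_eq_getElem lst 0 (by omega), List.getD_eq_getElem lst 0 hj]
      exact le_of_lt (List.pairwise_iff_getElem.mp hp i j (by omega) hj hlt)
  unfold bisectLoop
  split
  · rename_i h
    set mid := (lo + hi) / 2 with hmid
    have hm1 : lo ≤ mid := by omega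
    have hm2 : mid < hi := by omega
    dsimp only
    split
    · rename_i hbr
      obtain ⟨r1, r2, r3, r4⟩ := bisectLoop_spec lst x (mid + 1) hi hhi (by omega) hp
      refine ⟨by omega, r2, ?_, r4⟩
      intro k hk1 hk2
      by_cases hkm : k ≤ mid
      · exact lt_of_le_of_lt (hmono k mid hkm (by omega)) hbr
      · exact r3 k (by omega) hk2
    · rename_i hbr
      obtain ⟨r1, r2, r3, r4⟩ := bisectLoop_spec lst x lo mid (by omega) (by omega) hp
      refine ⟨r1, by omega, fun k hk1 hk2 => r3 k hk1 hk2, ?_⟩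
      intro _
      rcases Nat.eq_or_lt_of_le r2 with heq | hlt
      · rw [heq]; omega
      · exact r4 hlt
  · exact ⟨le_refl _, hlo, fun k hk1 hk2 => absurd (lt_of_le_of_lt hk1 hk2) (by omega), by omega⟩
termination_by hi - lo
decreasing_by all_goals omega

-- B's binary search on the occurrence list finds exactly what A's find does
theorem bisect_occ_step (value : List Char) (c : Char) (m : Nat) (hm : m ≤ value.length) :
    (bisectLoop (occList value c) (m : Int) 0 (occList value c).length = (occList value c).length →
      bScan value c m = value.length) ∧
    (bisectLoop (occList value c) (m : Int) 0 (occList value c).length < (occList value c).length →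
      (occList value c).getD (bisectLoop (occList value c) (m : Int) 0 (occList value c).length) 0
        = (bScan value c m : Int) ∧ bScan value c m < value.length) := by
  set lst := occList value c with hlst
  have hp := pairwise_occList value c
  obtain ⟨_, r2, r3, r4⟩ :=
    bisectLoop_spec lst (m : Int) 0 lst.length le_rfl (Nat.zero_le _) hp
  set r := bisectLoop lst (m : Int) 0 lst.length with hr
  constructor
  · intro hrl
    apply bScan_eq_length value c m hm
    intro hc
    obtain ⟨k, hk, hck⟩ := List.mem_iff_getElem.mp hc
    rw [List.getElem_drop] at hck
    have hklen : m + k < value.length := by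
      have := List.length_drop (l := value) (i := m) ▸ hk
      omega
    have hmem : ((m + k : Nat) : Int) ∈ lst :=
      (mem_occList value c _).mpr ⟨m + k, hklen, rfl, hck⟩
    obtain ⟨t, ht, hlt⟩ := List.getElem_of_mem hmem
    have := r3 t (Nat.zero_le _) (by omega)
    rw [List.getD_eq_getElem lst 0 ht, hlt] at this
    omega
  · intro hrlen
    have hmem : lst.getD r 0 ∈ lst := by
      rw [List.getD_eq_getElem lst 0 hrlen]
      exact List.getElem_mem hrlen
    obtain ⟨j, hj, hjx, hjc⟩ := (mem_occList value c _).mp hmem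
    have hge : (m : Int) ≤ lst.getD r 0 := r4 hrlen
    have hmj : m ≤ j := by omega
    have hfirst : ∀ k, ∀ _ : m ≤ k, ∀ _ : k < j, value[k]'(by omega) ≠ c := by
      intro k hk1 hk2 hkc
      have hkmem : ((k : Nat) : Int) ∈ lst :=
        (mem_occList value c _).mpr ⟨k, by omega, rfl, hkc⟩
      obtain ⟨t, ht, hlt⟩ := List.getElem_of_mem hkmem
      by_cases htr : t < r
      · have := r3 t (Nat.zero_le _) htr
        rw [List.getD_eq_getElem lst 0 ht, hlt] at this
        omega
      · have hle : lst[r]'hrlen ≤ lst[t]'ht := by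
          rcases Nat.eq_or_lt_of_le (Nat.le_of_not_lt htr) with rfl | hlt2
          · exact le_refl _
          · exact le_of_lt (List.pairwise_iff_getElem.mp hp r t hrlen ht hlt2)
        rw [hlt] at hle
        rw [List.getD_eq_getElem lst 0 hrlen] at hjx
        omega
    have hb : bScan value c m = j := bScan_eq_of_first value c m j hmj hj hjc hfirst
    exact ⟨by rw [hjx, hb], by omega⟩

theorem loop_eq (value : List Char) (cs : List Char) (out : List Int) (m : Nat)
    (hm : m ≤ value.length) :
    indexesOfLoopA value cs (out ++ [(m : Int)]) =
      indexesOfLoopB (buildPositions value) cs (m : Int) (out ++ [(m : Int)]) := by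
  induction cs generalizing out m with
  | nil => rfl
  | cons c cs' ih =>
    obtain ⟨hcase1, hcase2⟩ := bisect_occ_step value c m hm
    have hfind := bScan_findFrom value c m hm
    simp only [indexesOfLoopA, indexesOfLoopB, PySem.List.pyGetD_neg_one_append_singleton,
      getD_buildPositions]
    by_cases hr : bisectLoop (occList value c) (m : Int) 0 (occList value c).length
        = (occList value c).length
    · rw [if_pos hr]
      rw [if_pos (hcase1 hr)] at hfind
      rw [hfind, if_pos rfl]
    · rw [if_neg hr]
      have hrlen : bisectLoop (occList value c) (m : Int) 0 (occList value c).length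
          < (occList value c).length := by
        obtain ⟨_, h2, _, _⟩ := bisectLoop_spec (occList value c) (m : Int) 0
          (occList value c).length le_rfl (Nat.zero_le _) (pairwise_occList value c)
        omega
      obtain ⟨hcur, hblen⟩ := hcase2 hrlen
      rw [if_neg (by rw [hfind, if_neg (by omega)]; omega : ¬ PySem.Chars.findFrom value [c] (m : Int) = -1)]
      rw [hfind, if_neg (by omega), hcur]
      have := ih (out ++ [(m : Int)]) (bScan value c m) (by omega)
      simpa [List.append_assoc] using this

-- ===== VERDICT (by name: the statement is the Claim_ definition above) =====
theorem indexes_of_spec : Claim_equal_indexes_of := by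
  intro search value _
  unfold Spec_indexes_of indexes_of indexes_of_alt
  match hs : search.toList with
  | [] => rfl
  | c :: rest =>
    obtain ⟨hcase1, hcase2⟩ := bisect_occ_step value.toList c 0 (Nat.zero_le _)
    have hfind := bScan_findFrom value.toList c 0 (Nat.zero_le _)
    simp only [Nat.cast_zero, PySem.Chars.findFrom_zero] at hfind
    have hget : ∀ x : Int, PySem.List.pyGetD [x] (-1) 0 = x := fun x => by
      simpa using PySem.List.pyGetD_neg_one_append_singleton (α := Int) [] x 0
    simp only [Nat.cast_zero] at hcase1 hcase2
    simp only [indexesOfLoopB, getD_buildPositions, hget]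
    by_cases hr : bisectLoop (occList value.toList c) (0 : Int) 0 (occList value.toList c).length
        = (occList value.toList c).length
    · rw [if_pos hr]
      rw [if_pos (hcase1 hr)] at hfind
      rw [hfind, if_pos rfl]
    · rw [if_neg hr]
      have hrlen : bisectLoop (occList value.toList c) (0 : Int) 0 (occList value.toList c).length
          < (occList value.toList c).length := by
        obtain ⟨_, h2, _, _⟩ := bisectLoop_spec (occList value.toList c) (0 : Int) 0
          (occList value.toList c).length le_rfl (Nat.zero_le _) (pairwise_occList value.toList c)
        omega
      obtain ⟨hcur, hblen⟩ := hcase2 hrlen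
      rw [hfind, if_neg (by omega), hcur]
      rw [if_neg (by omega : ¬ bScan value.toList c 0 = value.toList.length)]
      have := loop_eq value.toList rest [] (bScan value.toList c 0) (by omega)
      simpa using this
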